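-- pv_equiv track=rewrite | github.com/HorizenOfficial/zen | qa/rpc-tests/prioritisetransaction.py | check_if_included_by_priority
-- ===== SOURCE A (Python) =====
-- def check_if_included_by_priority(tx, last_tx_by_priority, block_template):
--     tx_included_by_priority = False
--     tx_included = False
--     last_tx_by_priority_included = False
--     for index in range(len(block_template["transactions"])):
--         if (block_template["transactions"][index]["hash"] == last_tx_by_priority):
--             last_tx_by_priority_included = True
--         if (block_template["transactions"][index]["hash"] == tx):
--             tx_included = True
--             if (not last_tx_by_priority_included):
--                 tx_included_by_priority = True
--             break
--     return tx_included_by_priority, tx_included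
-- ===== SOURCE B (Python) =====
-- def check_if_included_by_priority(tx, last_tx_by_priority, block_template):
--     hashes = [t["hash"] for t in block_template["transactions"]]
--     tx_included = tx in hashes
--     if tx_included:
--         tx_pos = hashes.index(tx)
--         tx_included_by_priority = (tx != last_tx_by_priority) and (last_tx_by_priority not in hashes[:tx_pos])
--     else:
--         tx_included_by_priority = False
--     return tx_included_by_priority, tx_included
-- ===== Notes on version B (the rewrite author's own statement) =====
-- stated objective: simpler
-- what changed: Replaces A's flag-threading scan with break (tracking whether last_tx_by_priority was seen while searching for tx) by a precompute-then-compare decomposition: build the hash list once, test membership, and derive the by-priority flag from tx's first position and a prefix membership test.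
-- outside the precondition, e.g. on check_if_included_by_priority('a', 'b', {'transactions': [{'hash': 'a'}, {}]}): A returns (True, True), B raises KeyError
import Mathlib
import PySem

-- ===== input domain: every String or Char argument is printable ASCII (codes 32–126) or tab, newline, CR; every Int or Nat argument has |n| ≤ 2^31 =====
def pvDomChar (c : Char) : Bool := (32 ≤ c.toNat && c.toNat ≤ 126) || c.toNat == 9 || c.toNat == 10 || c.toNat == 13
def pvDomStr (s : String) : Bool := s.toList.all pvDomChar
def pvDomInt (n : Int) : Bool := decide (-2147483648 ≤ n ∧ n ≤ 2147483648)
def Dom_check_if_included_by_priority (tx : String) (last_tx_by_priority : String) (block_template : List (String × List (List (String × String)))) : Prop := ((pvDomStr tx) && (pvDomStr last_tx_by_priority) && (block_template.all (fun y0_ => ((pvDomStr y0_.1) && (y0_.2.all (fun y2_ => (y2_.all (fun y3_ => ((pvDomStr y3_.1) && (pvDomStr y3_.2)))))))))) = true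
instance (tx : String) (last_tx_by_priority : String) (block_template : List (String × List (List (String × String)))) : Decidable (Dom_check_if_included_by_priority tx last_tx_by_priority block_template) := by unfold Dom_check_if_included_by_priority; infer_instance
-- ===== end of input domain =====

-- B replaces A's flag-threading scan-with-break by a simpler precompute-then-compare
-- decomposition (hash list, membership, first position, prefix test); same O(n) cost.

-- ===== PORT A =====
-- the for-loop of A: threads the last_tx_by_priority_included flag, breaks on tx
def pvA_loop (tx last_tx_by_priority : String) (txs : List (List (String × String))) (lastInc : Bool) : Bool × Bool :=
  match txs with
  | [] => (false, false)
  | d :: rest =>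
    match (PySem.Dict.mk d).get? "hash" with
    | none => (false, false)   -- KeyError in Python; excluded by Pre_
    | some h =>
      let lastInc' := if h == last_tx_by_priority then true else lastInc
      if h == tx then (!lastInc', true)
      else pvA_loop tx last_tx_by_priority rest lastInc'

def check_if_included_by_priority (tx : String) (last_tx_by_priority : String) (block_template : List (String × List (List (String × String)))) : Bool × Bool :=
  match (PySem.Dict.mk block_template).get? "transactions" with
  | none => (false, false)     -- KeyError in Python; excluded by Pre_
  | some txs => pvA_loop tx last_tx_by_priority txs false

-- ===== PORT B =====
def check_if_included_by_priority_alt (tx : String) (last_tx_by_priority : String) (block_template : List (String × List (List (String × String)))) : Bool × Bool :=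
  match (PySem.Dict.mk block_template).get? "transactions" with
  | none => (false, false)     -- KeyError in Python; excluded by Pre_
  | some txs =>
    -- hashes = [t["hash"] for t in …]; the "" default is never used under Pre_ (KeyError there)
    let hashes := txs.map (fun t => ((PySem.Dict.mk t).get? "hash").getD "")
    let tx_included := hashes.contains tx
    if tx_included then
      let tx_pos : Nat := (PySem.List.index? hashes tx).getD 0
      ((tx != last_tx_by_priority) && !((PySem.List.slice hashes none (some (tx_pos : Int))).contains last_tx_by_priority), tx_included)
    else (false, tx_included)

-- ===== PRECONDITION & SPEC =====
-- Pre_ requires the "transactions" key and a "hash" key in EVERY transaction; A reads hashes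
-- only up to the first match of tx and so can still return when a later transaction lacks
-- "hash", where B's list comprehension raises KeyError (see cites).
def Pre_check_if_included_by_priority (tx : String) (last_tx_by_priority : String) (block_template : List (String × List (List (String × String)))) : Prop :=
  (PySem.Dict.mk block_template).contains "transactions" = true ∧
  ∀ t ∈ (PySem.Dict.mk block_template).getD "transactions" [], (PySem.Dict.mk t).contains "hash" = true
instance (tx : String) (last_tx_by_priority : String) (block_template : List (String × List (List (String × String)))) : Decidable (Pre_check_if_included_by_priority tx last_tx_by_priority block_template) := by unfold Pre_check_if_included_by_priority; infer_instance

def pvWitness_check_if_included_by_priority : String × String × (List (String × List (List (String × String)))) :=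
  ("a", "b", [("transactions", [[("hash", "b")], [("hash", "a")]])])

def Spec_check_if_included_by_priority (tx : String) (last_tx_by_priority : String) (block_template : List (String × List (List (String × String)))) (out : Bool × Bool) : Prop := out = check_if_included_by_priority_alt tx last_tx_by_priority block_template
instance (tx : String) (last_tx_by_priority : String) (block_template : List (String × List (List (String × String)))) (out : Bool × Bool) : Decidable (Spec_check_if_included_by_priority tx last_tx_by_priority block_template out) := by unfold Spec_check_if_included_by_priority; infer_instance

-- ===== CLAIM (what is proved, stated in full; the proofs are below) =====
def Claim_equal_check_if_included_by_priority : Prop := ∀ (tx : String) (last_tx_by_priority : String) (block_template : List (String × List (List (String × String)))), Dom_check_if_included_by_priority tx last_tx_by_priority block_template → Pre_check_if_included_by_priority tx last_tx_by_priority block_template → Spec_check_if_included_by_priority tx last_tx_by_priority block_template (check_if_included_by_priority tx last_tx_by_priority block_template)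

-- ===== LEMMAS AND PROOFS =====

def pvB_core (tx last_tx_by_priority : String) (hashes : List String) : Bool × Bool :=
  if hashes.contains tx then
    ((tx != last_tx_by_priority) && !((PySem.List.slice hashes none (some (((PySem.List.index? hashes tx).getD 0 : Nat) : Int))).contains last_tx_by_priority), true)
  else (false, false)

lemma pvA_loop_true (tx last : String) (hashes : List String) :
    pvA_loop tx last (hashes.map (fun h => [("hash", h)])) true = (false, hashes.contains tx) := by
  induction hashes with
  | nil => simp [pvA_loop]
  | cons h rest ih =>
    by_cases h1 : h = tx
    · subst h1; simp [pvA_loop, PySem.Dict.get?_mk_cons]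
    · simp [pvA_loop, PySem.Dict.get?_mk_cons, h1, ih, List.contains_cons]
      exact fun e => absurd e.symm h1



lemma pvA_loop_eq_core (tx last : String) (txs : List (List (String × String)))
    (hh : ∀ t ∈ txs, (PySem.Dict.mk t).contains "hash" = true) (lastInc : Bool) :
    pvA_loop tx last txs lastInc =
      pvA_loop tx last (txs.map (fun t => [("hash", ((PySem.Dict.mk t).get? "hash").getD "")])) lastInc := by
  induction txs generalizing lastInc with
  | nil => rfl
  | cons d rest ih =>
    have hd := hh d (by simp)
    rw [PySem.Dict.contains_eq_isSome_get?] at hd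
    obtain ⟨v, hv⟩ := Option.isSome_iff_exists.mp hd
    simp [pvA_loop, hv, PySem.Dict.get?_mk_cons]
    split_ifs <;> simp_all [ih (fun t ht => hh t (by simp [ht]))]

lemma pvA_cons (tx last h : String) (ms : List (List (String × String))) (lastInc : Bool) :
    pvA_loop tx last ([("hash", h)] :: ms) lastInc =
      if h = tx then (!(if h = last then true else lastInc), true)
      else pvA_loop tx last ms (if h = last then true else lastInc) := by
  simp [pvA_loop, PySem.Dict.get?_mk_cons]

lemma pvB_cons_mem (tx last h : String) (rest : List String) (htx : h ≠ tx) (hm : tx ∈ rest) :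
    pvB_core tx last (h :: rest) =
      ((tx != last) && !(h = last || (rest.take ((PySem.List.index? rest tx).getD 0)).contains last), true) := by
  obtain ⟨k, hk⟩ := Option.isSome_iff_exists.mp ((PySem.List.index?_isSome_iff rest tx).mpr hm)
  unfold pvB_core
  rw [if_pos (by simp [List.contains_cons]; right; simpa using hm)]
  rw [PySem.List.index?_cons_of_ne rest htx, hk]
  simp only [Option.map_some, Option.getD_some]
  rw [PySem.List.slice_to_natCast]
  simp [List.take_succ_cons, List.contains_cons, eq_comm]

lemma pvA_loop_false_eq_B (tx last : String) (hashes : List String) :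
    pvA_loop tx last (hashes.map (fun h => [("hash", h)])) false = pvB_core tx last hashes := by
  induction hashes with
  | nil => simp [pvA_loop, pvB_core]
  | cons h rest ih =>
    rw [List.map_cons, pvA_cons]
    by_cases htx : h = tx
    · subst htx
      rw [if_pos rfl]
      unfold pvB_core
      rw [PySem.List.index?_cons_self]
      simp only [Option.getD_some]
      rw [PySem.List.slice_to_natCast]
      by_cases tl : h = last
      · simp [tl]
      · have tl' : ¬ last = h := fun e => tl e.symm
        simp [tl, tl', bne]
    · rw [if_neg htx]
      by_cases hm : tx ∈ rest
      · rw [pvB_cons_mem tx last h rest htx hm]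
        by_cases hlast : h = last
        · rw [if_pos hlast, pvA_loop_true, hlast]
          simp [hm]
        · rw [if_neg hlast, ih]
          unfold pvB_core
          rw [if_pos (by simpa using hm)]
          simp [hlast]
      · have hB : pvB_core tx last (h :: rest) = (false, false) := by
          unfold pvB_core
          rw [if_neg (by simp [List.contains_cons, hm]; exact fun e => absurd e.symm htx)]
        rw [hB]
        split_ifs with hlast
        · rw [pvA_loop_true]; simp [hm]
        · rw [ih]; unfold pvB_core; rw [if_neg (by simpa using hm)]

lemma pvB_core_eq_alt (tx last : String) (hashes : List String) :
    pvB_core tx last hashes =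
      (if hashes.contains tx then
        ((tx != last) && !((PySem.List.slice hashes none (some (((PySem.List.index? hashes tx).getD 0 : Nat) : Int))).contains last), hashes.contains tx)
      else (false, hashes.contains tx)) := by
  unfold pvB_core; split_ifs with h1 <;> simp_all

-- ===== VERDICT (by name: the statement is the Claim_ definition above) =====
theorem check_if_included_by_priority_spec : Claim_equal_check_if_included_by_priority := by
  intro tx last bt _ hpre
  obtain ⟨h1, h2⟩ := hpre
  rw [PySem.Dict.contains_eq_isSome_get?] at h1
  obtain ⟨txs, htxs⟩ := Option.isSome_iff_exists.mp h1
  have h2' : ∀ t ∈ txs, (PySem.Dict.mk t).contains "hash" = true := by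
    intro t ht
    exact h2 t (by rw [PySem.Dict.getD_eq_get?_getD, htxs]; exact ht)
  unfold Spec_check_if_included_by_priority check_if_included_by_priority check_if_included_by_priority_alt
  rw [htxs]
  simp only []
  rw [pvA_loop_eq_core tx last txs h2' false]
  have hmm : txs.map (fun t => [("hash", ((PySem.Dict.mk t).get? "hash").getD "")]) =
      (txs.map (fun t => ((PySem.Dict.mk t).get? "hash").getD "")).map (fun h => [("hash", h)]) := by
    simp [List.map_map]
  rw [hmm, pvA_loop_false_eq_B, pvB_core_eq_alt]
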